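-- pv_equiv track=rewrite | github.com/c-c-t/berm | berm/loaders/terraform.py | _extract_address_from_reference
-- ===== SOURCE A (Python) =====
-- def _extract_address_from_reference(reference: str) -> str:
--     """Extract resource address from a Terraform reference string.
--
--     Strips trailing attribute access (e.g. .id, .arn) to return the base
--     resource address. Handles arbitrary module nesting depth.
--
--     Args:
--         reference: Terraform reference string (e.g., "aws_s3_bucket.example.id")
--
--     Returns:
--         Resource address (e.g., "aws_s3_bucket.example")
--
--     Examples:
--         >>> _extract_address_from_reference("aws_s3_bucket.example.id")
--         "aws_s3_bucket.example"
--
--         >>> _extract_address_from_reference("module.vpc.aws_subnet.private.id")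
--         "module.vpc.aws_subnet.private"
--
--         >>> _extract_address_from_reference("module.network.module.subnets.aws_subnet.private.id")
--         "module.network.module.subnets.aws_subnet.private"
--     """
--     if not reference:
--         return ""
--
--     parts = reference.split(".")
--
--     if len(parts) < 2:
--         return ""
--
--     if parts[0] != "module":
--         # Root resource: resource_type.resource_name[.attribute...]
--         return ".".join(parts[:2])
--
--     # Module resource: consume all leading "module.<name>" pairs, then take
--     # the following "resource_type.resource_name" pair.
--     i = 0
--     while i < len(parts) - 1 and parts[i] == "module":
--         i += 2  # skip "module" and the module name
--
--     # parts[i:i+2] is resource_type.resource_name (if present)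
--     if i + 1 < len(parts):
--         return ".".join(parts[: i + 2])
--
--     return ".".join(parts[:i])
-- ===== SOURCE B (Python) =====
-- def _extract_address_from_reference(reference: str) -> str:
--     """Extract resource address via a unified peel of leading module.<name> pairs."""
--     parts = reference.split(".")
--
--     def peel(rem):
--         if len(rem) >= 2 and rem[0] == "module":
--             return 2 + peel(rem[2:])
--         return 0
--
--     i = peel(parts)
--     if i + 1 < len(parts):
--         return ".".join(parts[: i + 2])
--     return ".".join(parts[:i])
-- ===== Notes on version B (the rewrite author's own statement) =====
-- stated objective: simpler
-- what changed: Replaces A's three-way branch (empty guard, root-resource branch, module while-loop) with one uniform computation: a recursive peel of leading module-name token pairs gives the skip index, and a single join of the first i+2 (or i) tokens covers empty, short, root and module references alike.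
import Mathlib
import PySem

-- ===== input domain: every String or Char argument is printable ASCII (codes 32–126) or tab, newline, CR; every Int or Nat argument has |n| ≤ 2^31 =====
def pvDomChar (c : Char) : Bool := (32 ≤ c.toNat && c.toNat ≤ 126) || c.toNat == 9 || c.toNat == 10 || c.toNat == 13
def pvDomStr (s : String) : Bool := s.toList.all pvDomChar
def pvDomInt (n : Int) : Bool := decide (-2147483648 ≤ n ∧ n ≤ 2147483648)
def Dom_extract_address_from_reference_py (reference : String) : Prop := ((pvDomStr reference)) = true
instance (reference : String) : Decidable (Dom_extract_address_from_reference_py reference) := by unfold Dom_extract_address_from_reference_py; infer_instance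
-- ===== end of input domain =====

-- B replaces A's empty-guard / root-branch / while-loop structure with one uniform
-- recursive peel of the leading module-name token pairs followed by a single join (simpler).

-- ===== PORT A =====
-- A's while-loop: 'while i < len(parts)-1 and parts[i] == "module": i += 2'.
-- parts.getD i "" is safe: the loop condition guarantees i < parts.length.
def pyLoopA (parts : List String) (i : Nat) : Nat :=
  if i < parts.length - 1 ∧ parts.getD i "" = "module" then pyLoopA parts (i + 2) else i
termination_by parts.length - i
decreasing_by omega

def extract_address_from_reference_py (reference : String) : String :=
  if reference = "" then ""
  else
    let parts := (PySem.Str.split? reference ".").getD []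
    if parts.length < 2 then ""
    else if parts.getD 0 "" ≠ "module" then
      -- root resource: ".".join(parts[:2])
      PySem.Str.join "." (PySem.List.slice parts none (some ((2 : Nat) : Int)))
    else
      let i := pyLoopA parts 0
      if i + 1 < parts.length then
        PySem.Str.join "." (PySem.List.slice parts none (some ((i + 2 : Nat) : Int)))
      else
        PySem.Str.join "." (PySem.List.slice parts none (some ((i : Nat) : Int)))

-- ===== PORT B =====
-- peel(rem) = 2 + peel(rem[2:]) if len(rem) >= 2 and rem[0] == "module" else 0
def peelB : List String → Nat
  | a :: _ :: rest => if a = "module" then 2 + peelB rest else 0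
  | _ => 0

def extract_address_from_reference_py_alt (reference : String) : String :=
  let parts := (PySem.Str.split? reference ".").getD []
  let i := peelB parts
  if i + 1 < parts.length then PySem.Str.join "." (parts.take (i + 2))
  else PySem.Str.join "." (parts.take i)

-- ===== PRECONDITION & SPEC =====
def Spec_extract_address_from_reference_py (reference : String) (out : String) : Prop := out = extract_address_from_reference_py_alt reference
instance (reference : String) (out : String) : Decidable (Spec_extract_address_from_reference_py reference out) := by unfold Spec_extract_address_from_reference_py; infer_instance

-- ===== CLAIM (what is proved, stated in full; the proofs are below) =====
def Claim_equal_extract_address_from_reference_py : Prop := ∀ (reference : String), Dom_extract_address_from_reference_py reference → Spec_extract_address_from_reference_py reference (extract_address_from_reference_py reference)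

-- ===== LEMMAS AND PROOFS =====

-- A's index-stepping loop computes j plus B's peel of the remaining tokens.
theorem pyLoopA_eq_peelB (parts : List String) (j : Nat) :
    pyLoopA parts j = j + peelB (parts.drop j) := by
  rw [pyLoopA]
  split
  case isTrue h =>
    obtain ⟨h1, h2⟩ := h
    have hj : j < parts.length := by omega
    have hj1 : j + 1 < parts.length := by omega
    rw [pyLoopA_eq_peelB parts (j + 2)]
    rw [List.drop_eq_getElem_cons hj, List.drop_eq_getElem_cons hj1]
    have hm : parts[j] = "module" := by rwa [List.getD_eq_getElem _ _ hj] at h2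
    have hdd : parts.drop (j + 1 + 1) = parts.drop (j + 2) := by norm_num
    simp [peelB, hm, hdd]
    omega
  case isFalse h =>
    by_cases h1 : j + 1 < parts.length
    · have h2 : ¬ parts.getD j "" = "module" := by
        intro hc; exact h ⟨by omega, hc⟩
      have hj : j < parts.length := by omega
      rw [List.drop_eq_getElem_cons hj, List.drop_eq_getElem_cons h1]
      have hm : parts[j] ≠ "module" := by rwa [List.getD_eq_getElem _ _ hj] at h2
      simp [peelB, hm]
    · have hlen : (parts.drop j).length ≤ 1 := by
        simp only [List.length_drop]; omega
      rcases hd : parts.drop j with _ | ⟨a, _ | ⟨b, t⟩⟩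
      · simp [peelB]
      · simp [peelB]
      · rw [hd] at hlen; simp at hlen
termination_by parts.length - j
decreasing_by omega

-- ".".join([]) is the empty string.
theorem join_dot_nil : PySem.Str.join "." ([] : List String) = "" := by decide

-- peel returns 0 unless the first token is "module".
theorem peelB_of_head_ne (a : String) (l : List String) (h : a ≠ "module") :
    peelB (a :: l) = 0 := by
  cases l with
  | nil => simp [peelB]
  | cons b t => simp [peelB, h]

theorem A_eq_B (reference : String) :
    extract_address_from_reference_py reference = extract_address_from_reference_py_alt reference := by
  unfold extract_address_from_reference_py extract_address_from_reference_py_alt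
  by_cases he : reference = ""
  · subst he; decide
  · simp only [he, if_false]
    set parts := (PySem.Str.split? reference ".").getD [] with hp
    by_cases hlen : parts.length < 2
    · simp only [hlen, if_true]
      rcases parts with _ | ⟨a, _ | ⟨b, t⟩⟩
      · simp [peelB, join_dot_nil]
      · simp [peelB, join_dot_nil]
      · simp at hlen
    · simp only [hlen, if_false]
      rcases hps : parts with _ | ⟨a, _ | ⟨b, t⟩⟩
      · rw [hps] at hlen; simp at hlen
      · rw [hps] at hlen; simp at hlen
      · rw [hps] at hlen
        by_cases hm : a = "module"
        · simp only [List.getD, List.getElem?_cons_zero, Option.getD_some, hm, ne_eq,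
            not_true_eq_false, if_false]
          have hloop : pyLoopA ("module" :: b :: t) 0 = peelB ("module" :: b :: t) := by
            simpa using pyLoopA_eq_peelB ("module" :: b :: t) 0
          rw [hloop]
          split
          · rw [PySem.List.slice_to_natCast]
          · rw [PySem.List.slice_to_natCast]
        · simp only [List.getD, List.getElem?_cons_zero, Option.getD_some, hm, ne_eq,
            not_false_eq_true, if_true]
          rw [peelB_of_head_ne a (b :: t) hm]
          have : (0 : Nat) + 1 < (a :: b :: t).length := by simp
          simp only [this, if_true]
          rw [PySem.List.slice_to_natCast]

-- ===== VERDICT (by name: the statement is the Claim_ definition above) =====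
theorem extract_address_from_reference_py_spec : Claim_equal_extract_address_from_reference_py := by
  intro reference _
  unfold Spec_extract_address_from_reference_py
  exact A_eq_B reference
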